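-- pv_equiv track=rewrite | github.com/K-ple/Algorithms_Judge | 프로그래머스/unrated/181935. 홀짝에 따라 다른 값 반환하기/홀짝에 따라 다른 값 반환하기.py | solution
-- ===== SOURCE A (Python) =====
-- def solution(n):
--     answer = 0
--     if n % 2 == 1:
--         answer += n
--         for i in range(n):
--             if i % 2 == 1:
--                 answer += i
--
--
--     elif n % 2 == 0:
--         answer += n**2
--         for j in range(n):
--             if j % 2 == 0:
--                 answer += j**2
--     return answer
-- ===== SOURCE B (Python) =====
-- def solution(n):
--     if n % 2:
--         m = max(0, (n - 1) // 2)          # number of odd i in range(n)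
--         return n + m * m
--     else:
--         m = max(0, n // 2)                # number of even j in range(n)
--         return n * n + 2 * m * (m - 1) * (2 * m - 1) // 3
-- ===== Notes on version B (the rewrite author's own statement) =====
-- stated objective: faster
-- what changed: Replaced A's linear loops summing odd numbers (resp. even squares) below n with constant-time closed-form arithmetic formulas.
import Mathlib
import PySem

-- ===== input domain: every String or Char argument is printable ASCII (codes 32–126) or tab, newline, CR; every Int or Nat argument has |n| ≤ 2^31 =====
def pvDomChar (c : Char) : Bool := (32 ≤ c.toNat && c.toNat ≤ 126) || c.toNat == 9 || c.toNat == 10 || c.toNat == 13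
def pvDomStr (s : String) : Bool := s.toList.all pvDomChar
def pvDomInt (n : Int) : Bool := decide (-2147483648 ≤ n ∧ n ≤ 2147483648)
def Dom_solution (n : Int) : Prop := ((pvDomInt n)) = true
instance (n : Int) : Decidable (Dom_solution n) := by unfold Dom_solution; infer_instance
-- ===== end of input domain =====

-- B replaces A's O(n) parity loops by O(1) closed-form square-sum formulas (objective: faster).

-- ===== PORT A =====
def solution (n : Int) : Int :=
  let answer : Int := 0
  if PySem.Int.mod n 2 == 1 then
    let answer := answer + n
    (PySem.List.pyRange 0 n 1).foldl
      (fun acc i => if PySem.Int.mod i 2 == 1 then acc + i else acc) answer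
  else if PySem.Int.mod n 2 == 0 then
    let answer := answer + n ^ 2
    (PySem.List.pyRange 0 n 1).foldl
      (fun acc j => if PySem.Int.mod j 2 == 0 then acc + j ^ 2 else acc) answer
  else answer

-- ===== PORT B =====
def solution_alt (n : Int) : Int :=
  if PySem.Int.mod n 2 != 0 then
    let m := max 0 (PySem.Int.floordiv (n - 1) 2)
    n + m * m
  else
    let m := max 0 (PySem.Int.floordiv n 2)
    n * n + PySem.Int.floordiv (2 * m * (m - 1) * (2 * m - 1)) 3

-- ===== PRECONDITION & SPEC =====
def Spec_solution (n : Int) (out : Int) : Prop := out = solution_alt n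
instance (n : Int) (out : Int) : Decidable (Spec_solution n out) := by unfold Spec_solution; infer_instance

-- ===== CLAIM (what is proved, stated in full; the proofs are below) =====
def Claim_equal_solution : Prop := ∀ (n : Int), Dom_solution n → Spec_solution n (solution n)

-- ===== LEMMAS AND PROOFS =====

-- sum of squares: 2m(m-1)(2m-1) = 12 * Σ_{t<m} t²
lemma pv_sqsum (m : Nat) :
    2 * (m : Int) * ((m : Int) - 1) * (2 * (m : Int) - 1)
      = 12 * ∑ t ∈ Finset.range m, (t : Int) ^ 2 := by
  induction m with
  | zero => simp
  | succ k ih =>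
    rw [Finset.sum_range_succ]
    push_cast
    push_cast at ih
    ring_nf
    ring_nf at ih
    linarith

-- A's odd-branch loop over range(k) adds (k/2)²
lemma pv_oddFold (k : Nat) (c : Int) :
    (PySem.List.pyRange 0 (k : Int) 1).foldl
      (fun acc i => if PySem.Int.mod i 2 == 1 then acc + i else acc) c
    = c + ((k / 2 : Nat) : Int) * ((k / 2 : Nat) : Int) := by
  induction k generalizing c with
  | zero => simp [PySem.List.pyRange_one_eq_nil]
  | succ k ih =>
    rw [show ((k + 1 : Nat) : Int) = (k : Int) + 1 by push_cast; ring,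
        PySem.List.pyRange_one_succ_right (by positivity)]
    rw [List.foldl_append, ih]
    simp only [List.foldl]
    have hmod : PySem.Int.mod (k : Int) 2 = ((k % 2 : Nat) : Int) := by
      exact_mod_cast PySem.Int.mod_natCast k 2
    rcases Nat.even_or_odd k with ⟨t, ht⟩ | ⟨t, ht⟩
    · have h0 : k % 2 = 0 := by omega
      have hcond : (PySem.Int.mod (k : Int) 2 == 1) = false := by
        rw [hmod, h0]; decide
      have hk2' : (k + 1) / 2 = k / 2 := by omega
      rw [hcond, hk2']
      simp
    · have h1 : k % 2 = 1 := by omega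
      have hcond : (PySem.Int.mod (k : Int) 2 == 1) = true := by
        rw [hmod, h1]; decide
      have hk2 : k / 2 = t := by omega
      have hk2' : (k + 1) / 2 = t + 1 := by omega
      rw [hcond, hk2, hk2', if_pos rfl, ht]
      push_cast
      ring

-- A's even-branch loop over range(k) adds 4 * Σ_{t<(k+1)/2} t²
lemma pv_evenFold (k : Nat) (c : Int) :
    (PySem.List.pyRange 0 (k : Int) 1).foldl
      (fun acc j => if PySem.Int.mod j 2 == 0 then acc + j ^ 2 else acc) c
    = c + 4 * ∑ t ∈ Finset.range ((k + 1) / 2), (t : Int) ^ 2 := by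
  induction k generalizing c with
  | zero => simp [PySem.List.pyRange_one_eq_nil]
  | succ k ih =>
    rw [show ((k + 1 : Nat) : Int) = (k : Int) + 1 by push_cast; ring,
        PySem.List.pyRange_one_succ_right (by positivity)]
    rw [List.foldl_append, ih]
    simp only [List.foldl]
    have hmod : PySem.Int.mod (k : Int) 2 = ((k % 2 : Nat) : Int) := by
      exact_mod_cast PySem.Int.mod_natCast k 2
    rcases Nat.even_or_odd k with ⟨t, ht⟩ | ⟨t, ht⟩
    · have h0 : k % 2 = 0 := by omega
      have hcond : (PySem.Int.mod (k : Int) 2 == 0) = true := by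
        rw [hmod, h0]; decide
      have hk2 : (k + 1) / 2 = t := by omega
      have hk2' : (k + 1 + 1) / 2 = t + 1 := by omega
      rw [hcond, hk2, hk2', if_pos rfl, Finset.sum_range_succ, ht]
      push_cast
      ring
    · have h1 : k % 2 = 1 := by omega
      have hcond : (PySem.Int.mod (k : Int) 2 == 0) = false := by
        rw [hmod, h1]; decide
      have hk2 : (k + 1 + 1) / 2 = (k + 1) / 2 := by omega
      rw [hcond, hk2]
      simp

-- ===== VERDICT (by name: the statement is the Claim_ definition above) =====
theorem solution_spec : Claim_equal_solution := by
  intro n _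
  unfold Spec_solution solution solution_alt
  have hm2 : PySem.Int.mod n 2 = n % 2 := PySem.Int.mod_eq_emod_of_pos (by norm_num)
  have hfd2 : ∀ a : Int, PySem.Int.floordiv a 2 = a / 2 :=
    fun a => PySem.Int.floordiv_eq_ediv_of_pos (by norm_num)
  have hfd3 : ∀ a : Int, PySem.Int.floordiv a 3 = a / 3 :=
    fun a => PySem.Int.floordiv_eq_ediv_of_pos (by norm_num)
  rcases Int.emod_two_eq_zero_or_one n with he | ho
  · -- n even
    have hne : ¬ (PySem.Int.mod n 2 == 1) = true := by simp [he]
    have heq : (PySem.Int.mod n 2 == 0) = true := by simp [he]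
    have hbne : (PySem.Int.mod n 2 != 0) = false := by simp [he]
    simp only [hne, heq, hbne, if_true, if_false, Bool.false_eq_true]
    by_cases hpos : 0 < n
    · obtain ⟨m, hm⟩ : ∃ m : Nat, n = 2 * (m : Int) := by
        have h2 : (2:Int) ∣ n := Int.dvd_of_emod_eq_zero he
        obtain ⟨c, hc⟩ := h2
        exact ⟨c.toNat, by omega⟩
      have hn : n = ((2 * m : Nat) : Int) := by push_cast; omega
      rw [hn, pv_evenFold]
      have : (2 * m + 1) / 2 = m := by omega
      rw [this]
      have hmax : max 0 (PySem.Int.floordiv ((2 * m : Nat) : Int) 2) = (m : Int) := by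
        rw [hfd2]; push_cast; omega
      rw [hmax, hfd3, pv_sqsum m]
      rw [show (12 : Int) * ∑ t ∈ Finset.range m, (t:Int)^2
            = 3 * (4 * ∑ t ∈ Finset.range m, (t:Int)^2) by ring,
          Int.mul_ediv_cancel_left _ (by norm_num)]
      push_cast; ring
    · have hnil : PySem.List.pyRange 0 n 1 = [] :=
        PySem.List.pyRange_one_eq_nil (by omega)
      rw [hnil]
      have hmax : max 0 (PySem.Int.floordiv n 2) = 0 := by
        rw [hfd2]; omega
      rw [hmax, hfd3]
      norm_num
      ring
  · -- n odd
    have hoe : (PySem.Int.mod n 2 == 1) = true := by simp [ho]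
    have hbne : (PySem.Int.mod n 2 != 0) = true := by simp [ho]
    simp only [hoe, hbne, if_true]
    by_cases hpos : 0 < n
    · obtain ⟨m, hm⟩ : ∃ m : Nat, n = 2 * (m : Int) + 1 := by
        exact ⟨(n / 2).toNat, by omega⟩
      have hn : n = ((2 * m + 1 : Nat) : Int) := by push_cast; omega
      rw [hn, pv_oddFold]
      have : (2 * m + 1) / 2 = m := by omega
      rw [this]
      have hmax : max 0 (PySem.Int.floordiv (((2 * m + 1 : Nat) : Int) - 1) 2) = (m : Int) := by
        rw [hfd2]; push_cast; omega
      rw [hmax]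
      ring
    · have hnil : PySem.List.pyRange 0 n 1 = [] :=
        PySem.List.pyRange_one_eq_nil (by omega)
      rw [hnil]
      have hmax : max 0 (PySem.Int.floordiv (n - 1) 2) = 0 := by
        rw [hfd2]; omega
      rw [hmax]
      simp
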